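-- pv_equiv track=rewrite | github.com/milancvetanovic/SmartCalculator | parsing_math_expression.py | nums_and_vars
-- ===== SOURCE A (Python) =====
-- def nums_and_vars(expression):
--     i = 0
--     while i < len(expression) - 1:
--         if expression[i].isalnum():
--             for item in expression[i + 1::]:
--                 if not item.isalnum():
--                     break
--                 expression[i] += expression.pop(i + 1)
--         i += 1
--
--     return expression
-- ===== SOURCE B (Python) =====
-- def nums_and_vars(expression):
--     result = []
--     run = []
--     for tok in expression:
--         if tok.isalnum():
--             run.append(tok)
--         else:
--             if run:
--                 result.append(''.join(run))
--                 run = []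
--             result.append(tok)
--     if run:
--         result.append(''.join(run))
--     expression[:] = result
--     return expression
-- ===== Notes on version B (the rewrite author's own statement) =====
-- stated objective: faster
-- what changed: Replaces the index-walking while-loop that repeatedly pops merged neighbours out of the list (quadratic element shifting and repeated in-place string concatenation) with a single left-to-right pass that buffers each alnum run in a list and emits it as one ''.join at the run's end, then writes the result back in place.
import Mathlib
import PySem

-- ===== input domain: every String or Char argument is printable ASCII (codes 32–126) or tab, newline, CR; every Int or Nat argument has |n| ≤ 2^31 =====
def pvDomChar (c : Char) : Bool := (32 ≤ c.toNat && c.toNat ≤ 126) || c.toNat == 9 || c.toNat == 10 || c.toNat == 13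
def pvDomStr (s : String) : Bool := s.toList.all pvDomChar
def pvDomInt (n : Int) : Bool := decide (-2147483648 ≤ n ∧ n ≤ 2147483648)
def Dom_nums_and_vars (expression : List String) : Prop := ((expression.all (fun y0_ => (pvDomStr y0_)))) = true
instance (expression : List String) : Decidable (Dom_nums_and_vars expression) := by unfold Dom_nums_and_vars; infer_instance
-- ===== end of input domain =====

-- B merges maximal runs of alnum tokens in one pass with a run buffer joined at run end, instead of A's index walk with repeated pops.
-- Both Pythons mutate `expression` in place and return it; the equivalence proved here is about the return value.

-- ===== PORT A =====
-- inner `for item in expression[i+1::]` loop: pop the neighbour and concatenate while alnum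
def pvInnerA (i : Nat) : List String → List String → List String
  | [], expr => expr
  | item :: rest, expr =>
    if PySem.Str.strIsalnum item = false then expr
    else
      match PySem.List.pop? expr ((i : Int) + 1) with
      | none => expr            -- unreachable: the popped index is always in range
      | some (v, expr') => pvInnerA i rest (expr'.set i (PySem.List.pyGetD expr (i : Int) "" ++ v))

theorem pvInnerA_length_le (i : Nat) (snap : List String) : ∀ expr : List String, (pvInnerA i snap expr).length ≤ expr.length := by
  induction snap with
  | nil => intro expr; simp [pvInnerA]
  | cons item rest ih =>
    intro expr
    simp only [pvInnerA]
    split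
    · exact le_refl _
    · cases hp : PySem.List.pop? expr ((i : Int) + 1) with
      | none => exact le_refl _
      | some r =>
        have hlen : r.2.length + 1 = expr.length := PySem.List.length_of_pop?_eq_some expr hp
        calc (pvInnerA i rest (r.2.set i (PySem.List.pyGetD expr (i : Int) "" ++ r.1))).length
            ≤ (r.2.set i (PySem.List.pyGetD expr (i : Int) "" ++ r.1)).length := ih _
          _ ≤ expr.length := by simp; omega

-- outer `while i < len(expression) - 1` loop
def pvLoopA (expr : List String) (i : Nat) : List String :=
  if h : i + 1 < expr.length then
    let expr' :=
      if PySem.Str.strIsalnum (PySem.List.pyGetD expr (i : Int) "") then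
        pvInnerA i (PySem.List.slice expr (some ((i : Int) + 1)) none) expr
      else expr
    pvLoopA expr' (i + 1)
  else expr
termination_by expr.length - i
decreasing_by
  split
  · have := pvInnerA_length_le i (PySem.List.slice expr (some ((i : Int) + 1)) none) expr
    omega
  · omega

def nums_and_vars (expression : List String) : List String := pvLoopA expression 0

-- ===== PORT B =====
-- one step of B's fold over state (result, run): buffer alnum tokens in run, flush on a non-alnum token
def pvStepB (state : List String × List String) (tok : String) : List String × List String :=
  if PySem.Str.strIsalnum tok then (state.1, state.2 ++ [tok])
  else
    ((if state.2.isEmpty then state.1 else state.1 ++ [PySem.Str.join "" state.2]) ++ [tok], [])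

def nums_and_vars_alt (expression : List String) : List String :=
  let st := expression.foldl pvStepB ([], [])
  if st.2.isEmpty then st.1 else st.1 ++ [PySem.Str.join "" st.2]

-- ===== PRECONDITION & SPEC =====
def Spec_nums_and_vars (expression : List String) (out : List String) : Prop := out = nums_and_vars_alt expression
instance (expression : List String) (out : List String) : Decidable (Spec_nums_and_vars expression out) := by unfold Spec_nums_and_vars; infer_instance

-- ===== CLAIM (what is proved, stated in full; the proofs are below) =====
def Claim_equal_nums_and_vars : Prop := ∀ (expression : List String), Dom_nums_and_vars expression → Spec_nums_and_vars expression (nums_and_vars expression)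

-- ===== LEMMAS AND PROOFS =====

def pvAlnum (s : String) : Bool := PySem.Str.strIsalnum s

def pvConcatAll : List String → String
  | [] => ""
  | x :: xs => x ++ pvConcatAll xs

-- the common characterisation: merge maximal runs of alnum tokens
def pvMergeRuns : List String → List String
  | [] => []
  | x :: xs =>
    if pvAlnum x then
      (x ++ pvConcatAll (xs.takeWhile pvAlnum)) :: pvMergeRuns (xs.dropWhile pvAlnum)
    else x :: pvMergeRuns xs
termination_by xs => xs.length
decreasing_by
  · have := List.length_dropWhile_le pvAlnum xs
    simp; omega
  · simp

theorem pvGetD_at (pre : List String) (c : String) (rest : List String) :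
    PySem.List.pyGetD (pre ++ c :: rest) (pre.length : Int) "" = c := by
  induction pre with
  | nil => simp [PySem.List.pyGetD_zero_cons]
  | cons x xs ih => simpa [PySem.List.pyGetD] using ih

theorem pvEraseIdx_at (pre : List String) (c item : String) (rest : List String) :
    (pre ++ c :: item :: rest).eraseIdx (pre.length + 1) = pre ++ c :: rest := by
  induction pre with
  | nil => simp
  | cons x xs ih => simpa [List.eraseIdx] using ih

theorem pvGetElem?_at (pre : List String) (c item : String) (rest : List String) :
    (pre ++ c :: item :: rest)[pre.length + 1]? = some item := by
  induction pre with
  | nil => simp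
  | cons x xs ih => simpa using ih

theorem pvPop_at (pre : List String) (c item : String) (rest : List String) :
    PySem.List.pop? (pre ++ c :: item :: rest) ((pre.length : Int) + 1) = some (item, pre ++ c :: rest) := by
  have h : pre.length + 1 < (pre ++ c :: item :: rest).length := by simp
  have hp := PySem.List.pop?_natCast (pre ++ c :: item :: rest) (pre.length + 1) h
  have hg : (pre ++ c :: item :: rest)[pre.length + 1]'h = item := by
    have h2 := pvGetElem?_at pre c item rest
    rw [List.getElem?_eq_getElem h] at h2
    exact Option.some.inj h2
  rw [show ((pre.length : Int) + 1) = ((pre.length + 1 : Nat) : Int) by omega, hp, hg, pvEraseIdx_at]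

theorem pvSet_at (pre : List String) (c v : String) (rest : List String) :
    (pre ++ c :: rest).set pre.length v = pre ++ v :: rest := by
  induction pre with
  | nil => simp
  | cons x xs ih => simpa using ih

-- the inner pop loop builds the run starting at position pre.length
theorem pvInnerA_spec (snap : List String) : ∀ (pre : List String) (c : String),
    pvInnerA pre.length snap (pre ++ c :: snap) =
      pre ++ (c ++ pvConcatAll (snap.takeWhile pvAlnum)) :: snap.dropWhile pvAlnum := by
  induction snap with
  | nil => intro pre c; simp [pvInnerA, pvConcatAll]
  | cons item rest ih =>
    intro pre c
    by_cases hi : pvAlnum item = true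
    · have hi' : PySem.Str.strIsalnum item = true := hi
      simp only [pvInnerA, hi', Bool.true_eq_false, if_false,
        pvPop_at pre c item rest, pvGetD_at pre c (item :: rest)]
      rw [pvSet_at, ih pre (c ++ item)]
      simp [List.takeWhile_cons, List.dropWhile_cons, hi, pvConcatAll, String.append_assoc]
    · have hi' : PySem.Str.strIsalnum item = false := by
        simpa [pvAlnum] using hi
      simp [pvInnerA, hi', List.takeWhile_cons, List.dropWhile_cons, hi, pvConcatAll]
      intro hcontra
      rw [PySem.Str.strIsalnum_eq] at hi'
      simp [hi'] at hcontra

-- the outer while loop merges everything from position i on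
theorem pvTake_at (pre : List String) (x : String) (t : List String) :
    (pre ++ x :: t).take (pre.length + 1) = pre ++ [x] := by
  induction pre with
  | nil => simp
  | cons y ys ih => simpa using ih

theorem pvDrop_at (pre : List String) (x : String) (t : List String) :
    (pre ++ x :: t).drop (pre.length + 1) = t := by
  induction pre with
  | nil => simp
  | cons y ys ih => simpa using ih

theorem pvMergeRuns_singleton (c : String) : pvMergeRuns [c] = [c] := by
  rw [pvMergeRuns]
  split <;> simp [pvConcatAll, pvMergeRuns]

theorem pvMergeRuns_cons_pos (c : String) (rest : List String) (hc : pvAlnum c = true) :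
    pvMergeRuns (c :: rest) =
      (c ++ pvConcatAll (rest.takeWhile pvAlnum)) :: pvMergeRuns (rest.dropWhile pvAlnum) := by
  rw [pvMergeRuns, if_pos hc]

theorem pvMergeRuns_cons_neg (c : String) (rest : List String) (hc : pvAlnum c = false) :
    pvMergeRuns (c :: rest) = c :: pvMergeRuns rest := by
  rw [pvMergeRuns, if_neg (by simp [hc])]

theorem pvLoopA_stop (expr : List String) (i : Nat) (h : ¬ (i + 1 < expr.length)) :
    expr = expr.take i ++ pvMergeRuns (expr.drop i) := by
  by_cases hi : i < expr.length
  · obtain ⟨pre, c, hdec, hl⟩ : ∃ pre c, expr = pre ++ [c] ∧ pre.length = i :=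
      ⟨expr.take i, expr[i], by
        conv_lhs => rw [← List.take_append_drop i expr, ← List.getElem_cons_drop hi]
        rw [List.drop_eq_nil_of_le (by omega)], by simp; omega⟩
    subst hdec; subst hl
    rw [List.take_left, List.drop_left, pvMergeRuns_singleton]
  · rw [List.take_of_length_le (by omega), List.drop_eq_nil_of_le (by omega)]
    simp [pvMergeRuns]

theorem pvLoopA_spec_aux (n : Nat) : ∀ (expr : List String) (i : Nat), expr.length ≤ i + n →
    pvLoopA expr i = expr.take i ++ pvMergeRuns (expr.drop i) := by
  induction n with
  | zero =>
    intro expr i hle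
    rw [pvLoopA, dif_neg (by omega)]
    exact pvLoopA_stop expr i (by omega)
  | succ n ihn =>
    intro expr i hle
    rw [pvLoopA]
    split
    case isFalse h => exact pvLoopA_stop expr i h
    case isTrue h =>
      obtain ⟨pre, c, rest, hdec, hl⟩ : ∃ pre c rest, expr = pre ++ c :: rest ∧ pre.length = i :=
        ⟨expr.take i, expr[i]'(by omega), expr.drop (i + 1), by
          conv_lhs => rw [← List.take_append_drop i expr, ← List.getElem_cons_drop (by omega)], by simp; omega⟩
      subst hdec; subst hl
      have hrest : rest.length ≤ n := by simp at hle h; omega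
      show pvLoopA
        (if PySem.Str.strIsalnum (PySem.List.pyGetD (pre ++ c :: rest) ((pre.length : Int)) "") = true then
          pvInnerA pre.length (PySem.List.slice (pre ++ c :: rest) (some ((pre.length : Int) + 1)) none) (pre ++ c :: rest)
        else pre ++ c :: rest) (pre.length + 1) = _
      rw [pvGetD_at pre c rest,
        show ((pre.length : Int) + 1) = ((pre.length + 1 : Nat) : Int) by omega,
        PySem.List.slice_from_natCast, pvDrop_at]
      by_cases hc : pvAlnum c = true
      · rw [if_pos (show PySem.Str.strIsalnum c = true from hc), pvInnerA_spec rest pre c]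
        rw [ihn _ (pre.length + 1) (by
          simp
          have := List.length_dropWhile_le pvAlnum rest
          omega)]
        rw [show pre.length + 1 = (pre : List String).length + 1 by rfl, pvTake_at, pvDrop_at,
          List.take_left, List.drop_left, pvMergeRuns_cons_pos _ _ hc]
        simp
      · rw [if_neg (show ¬ PySem.Str.strIsalnum c = true by simpa [pvAlnum] using hc)]
        rw [ihn _ (pre.length + 1) (by simp; omega)]
        rw [pvTake_at, pvDrop_at, List.take_left, List.drop_left,
          pvMergeRuns_cons_neg _ _ (by simpa using hc)]
        simp

theorem pvLoopA_spec (expr : List String) (i : Nat) :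
    pvLoopA expr i = expr.take i ++ pvMergeRuns (expr.drop i) :=
  pvLoopA_spec_aux expr.length expr i (by omega)

theorem pvHead_dropWhile (xs : List String) : ∀ y ∈ (xs.dropWhile pvAlnum).head?, pvAlnum y = false := by
  induction xs with
  | nil => simp
  | cons x xs ih =>
    by_cases hx : pvAlnum x
    · simpa [List.dropWhile_cons, hx] using ih
    · simp [List.dropWhile_cons, hx, Bool.eq_false_iff.mpr hx]

-- "".join over the run buffer is plain concatenation
theorem pvJoin_empty_sep (l : List String) : PySem.Str.join "" l = pvConcatAll l := by
  induction l with
  | nil =>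
    apply String.ext
    simp [PySem.Str.toList_join, PySem.Chars.join_nil, pvConcatAll]
  | cons x xs ih =>
    cases xs with
    | nil =>
      apply String.ext
      simp [PySem.Str.toList_join, PySem.Chars.join_singleton, pvConcatAll]
    | cons y ys =>
      apply String.ext
      have ihl := congrArg String.toList ih
      simp [PySem.Str.toList_join, PySem.Chars.join_cons_cons, pvConcatAll] at ihl ⊢
      simp [ihl]

theorem pvAlnumC (x : String) (h : pvAlnum x = true) : PySem.Chars.strIsalnum x.toList = true := by
  simpa [pvAlnum, PySem.Str.strIsalnum_eq] using h

theorem pvAlnumCf (x : String) (h : pvAlnum x = false) : PySem.Chars.strIsalnum x.toList = false := by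
  simpa [pvAlnum, PySem.Str.strIsalnum_eq] using h

-- B's fold moves a whole alnum streak into the run buffer
theorem pvFoldB_run (xs : List String) : ∀ (result run : List String),
    List.foldl pvStepB (result, run) xs =
      List.foldl pvStepB (result, run ++ xs.takeWhile pvAlnum) (xs.dropWhile pvAlnum) := by
  induction xs with
  | nil => intro result run; simp
  | cons y ys ih =>
    intro result run
    by_cases hy : pvAlnum y = true
    · rw [List.foldl_cons,
        show pvStepB (result, run) y = (result, run ++ [y]) by simp [pvStepB, pvAlnumC y hy],
        ih result (run ++ [y])]
      simp [List.takeWhile_cons, hy]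
    · have hyf : pvAlnum y = false := by simpa using hy
      simp [List.takeWhile_cons, List.dropWhile_cons, hyf]

-- flushing the run buffer at the end
def pvFinishB (st : List String × List String) : List String :=
  if st.2.isEmpty then st.1 else st.1 ++ [PySem.Str.join "" st.2]

-- B's fold from an empty run buffer appends the merged runs
theorem pvFoldB_main (xs : List String) : ∀ (result : List String),
    pvFinishB (List.foldl pvStepB (result, []) xs) = result ++ pvMergeRuns xs := by
  induction xs using pvMergeRuns.induct with
  | case1 => intro result; simp [pvFinishB, pvMergeRuns]
  | case2 x xs hx ih =>
    intro result
    rw [List.foldl_cons,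
      show pvStepB (result, []) x = (result, [x]) by simp [pvStepB, pvAlnumC x hx],
      pvFoldB_run xs result [x]]
    cases hdw : xs.dropWhile pvAlnum with
    | nil =>
      rw [List.foldl_nil, pvMergeRuns_cons_pos _ _ hx, hdw]
      simp [pvFinishB, pvMergeRuns, pvJoin_empty_sep, pvConcatAll]
    | cons z zs =>
      have hz : pvAlnum z = false := pvHead_dropWhile xs z (by rw [hdw]; rfl)
      have hstep1 : List.foldl pvStepB (result, [x] ++ xs.takeWhile pvAlnum) (z :: zs)
          = List.foldl pvStepB (result ++ [PySem.Str.join "" ([x] ++ xs.takeWhile pvAlnum)], []) (z :: zs) := by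
        rw [List.foldl_cons, List.foldl_cons]
        congr 1
        simp [pvStepB, pvAlnumCf z hz]
      rw [hstep1, ← hdw, ih, pvMergeRuns_cons_pos _ _ hx]
      simp [pvJoin_empty_sep, pvConcatAll]
  | case3 x xs hx ih =>
    intro result
    have hx' : pvAlnum x = false := by simpa using hx
    rw [List.foldl_cons,
      show pvStepB (result, []) x = (result ++ [x], []) by simp [pvStepB, pvAlnumCf x hx'],
      ih (result ++ [x]), pvMergeRuns_cons_neg _ _ hx']
    simp

theorem pvA_eq_merge (expr : List String) : nums_and_vars expr = pvMergeRuns expr := by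
  have := pvLoopA_spec expr 0
  simpa [nums_and_vars] using this

theorem pvB_eq_merge (expr : List String) : nums_and_vars_alt expr = pvMergeRuns expr := by
  have h := pvFoldB_main expr []
  simpa [nums_and_vars_alt, pvFinishB] using h

-- ===== VERDICT =====
theorem nums_and_vars_spec : Claim_equal_nums_and_vars := by
  intro expression _
  unfold Spec_nums_and_vars
  rw [pvA_eq_merge, pvB_eq_merge]
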